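-- pv_equiv track=rewrite | github.com/iGentAI/ferrocarril | process_wikipron.py | filter_pronunciation
-- ===== SOURCE A (Python) =====
-- def filter_pronunciation(pron):
--     """Filter out potentially problematic pronunciations."""
--     # Check for valid ARPABET phonemes
--     valid_phonemes = {
--         'AA', 'AE', 'AH', 'AO', 'AW', 'AY', 'B', 'CH', 'D', 'DH', 'EH', 'ER',
--         'EY', 'F', 'G', 'HH', 'IH', 'IY', 'JH', 'K', 'L', 'M', 'N', 'NG', 'OW',
--         'OY', 'P', 'R', 'S', 'SH', 'T', 'TH', 'UH', 'UW', 'V', 'W', 'Y', 'Z', 'ZH'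
--     }
--
--     for phoneme in pron:
--         # Remove stress markers
--         phoneme_base = phoneme.rstrip('012')
--         if phoneme_base not in valid_phonemes:
--             return False
--
--     # Must have at least one vowel
--     has_vowel = False
--     vowels = {'AA', 'AE', 'AH', 'AO', 'AW', 'AY', 'EH', 'ER', 'EY', 'IH', 'IY', 'OW', 'OY', 'UH', 'UW'}
--     for phoneme in pron:
--         phoneme_base = phoneme.rstrip('012')
--         if phoneme_base in vowels:
--             has_vowel = True
--             break
--
--     return has_vowel
-- ===== SOURCE B (Python) =====
-- # Single pass with an accumulator over one classifying dict (base -> is_vowel),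
-- # instead of A's two staged early-exit loops over two sets.
-- _KIND = {
--     'AA': True, 'AE': True, 'AH': True, 'AO': True, 'AW': True, 'AY': True,
--     'EH': True, 'ER': True, 'EY': True, 'IH': True, 'IY': True, 'OW': True,
--     'OY': True, 'UH': True, 'UW': True,
--     'B': False, 'CH': False, 'D': False, 'DH': False, 'F': False, 'G': False,
--     'HH': False, 'JH': False, 'K': False, 'L': False, 'M': False, 'N': False,
--     'NG': False, 'P': False, 'R': False, 'S': False, 'SH': False, 'T': False,
--     'TH': False, 'V': False, 'W': False, 'Y': False, 'Z': False, 'ZH': False,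
-- }
--
-- def filter_pronunciation(pron):
--     """Filter out potentially problematic pronunciations."""
--     has_vowel = False
--     for phoneme in pron:
--         kind = _KIND.get(phoneme.rstrip('012'))
--         if kind is None:
--             return False
--         has_vowel = has_vowel or kind
--     return has_vowel
-- ===== Notes on version B (the rewrite author's own statement) =====
-- stated objective: simpler
-- what changed: Replaces A's two staged early-exit loops over two phoneme sets by a single pass with a has_vowel accumulator, classifying each stress-stripped base through one precomputed dict mapping base to is_vowel.
import Mathlib
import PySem

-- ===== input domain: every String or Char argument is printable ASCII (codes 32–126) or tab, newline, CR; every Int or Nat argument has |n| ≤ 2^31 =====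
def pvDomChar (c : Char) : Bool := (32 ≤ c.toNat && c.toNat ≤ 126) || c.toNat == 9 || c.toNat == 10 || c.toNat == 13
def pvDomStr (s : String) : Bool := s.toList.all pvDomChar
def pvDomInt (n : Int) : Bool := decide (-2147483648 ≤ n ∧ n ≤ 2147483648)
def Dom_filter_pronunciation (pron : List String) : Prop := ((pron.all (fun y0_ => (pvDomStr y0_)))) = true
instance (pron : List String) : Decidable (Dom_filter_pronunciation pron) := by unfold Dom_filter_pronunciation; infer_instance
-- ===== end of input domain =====

-- B replaces A's two staged early-exit loops over two sets by ONE pass with a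
-- has_vowel accumulator, classifying each stripped base through a single
-- dict base -> is_vowel (objective: simpler).

-- hand port of Python s.rstrip('012') (PySem has no rstrip-with-chars): drop the
-- maximal trailing run of characters in {'0','1','2'} — exact for every string
def pvRstrip012 (s : String) : String :=
  String.ofList ((s.toList.reverse.dropWhile (fun c => c == '0' || c == '1' || c == '2')).reverse)

-- ===== PORT A =====
-- A's two set literals
def pvValidPhonemes : PySem.Set String := PySem.Set.ofList
  ["AA", "AE", "AH", "AO", "AW", "AY", "B", "CH", "D", "DH", "EH", "ER",
   "EY", "F", "G", "HH", "IH", "IY", "JH", "K", "L", "M", "N", "NG", "OW",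
   "OY", "P", "R", "S", "SH", "T", "TH", "UH", "UW", "V", "W", "Y", "Z", "ZH"]

def pvVowels : PySem.Set String := PySem.Set.ofList
  ["AA", "AE", "AH", "AO", "AW", "AY", "EH", "ER", "EY", "IH", "IY", "OW",
   "OY", "UH", "UW"]

-- second loop of A: scan for a vowel, early break
def pvAVowelLoop : List String → Bool
  | [] => false
  | phoneme :: rest =>
      if PySem.Set.contains pvVowels (pvRstrip012 phoneme) then true
      else pvAVowelLoop rest

-- first loop of A: early return False on an invalid base, else fall through to the vowel loop
def pvAValidLoop : List String → List String → Bool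
  | pron, [] => pvAVowelLoop pron
  | pron, phoneme :: rest =>
      if !(PySem.Set.contains pvValidPhonemes (pvRstrip012 phoneme)) then false
      else pvAValidLoop pron rest

def filter_pronunciation (pron : List String) : Bool :=
  pvAValidLoop pron pron

-- ===== PORT B =====
-- B's module-level classifying dict _KIND : base -> is_vowel
def pvKind : PySem.Dict String Bool := PySem.Dict.ofList
  [("AA", true), ("AE", true), ("AH", true), ("AO", true), ("AW", true), ("AY", true),
   ("EH", true), ("ER", true), ("EY", true), ("IH", true), ("IY", true), ("OW", true),
   ("OY", true), ("UH", true), ("UW", true),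
   ("B", false), ("CH", false), ("D", false), ("DH", false), ("F", false), ("G", false),
   ("HH", false), ("JH", false), ("K", false), ("L", false), ("M", false), ("N", false),
   ("NG", false), ("P", false), ("R", false), ("S", false), ("SH", false), ("T", false),
   ("TH", false), ("V", false), ("W", false), ("Y", false), ("Z", false), ("ZH", false)]

-- B's single for-loop with the has_vowel accumulator, early return on a missing key
def pvBLoop : List String → Bool → Bool
  | [], has_vowel => has_vowel
  | phoneme :: rest, has_vowel =>
      match PySem.Dict.get? pvKind (pvRstrip012 phoneme) with
      | none => false
      | some kind => pvBLoop rest (has_vowel || kind)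

def filter_pronunciation_alt (pron : List String) : Bool :=
  pvBLoop pron false

-- ===== PRECONDITION & SPEC =====
def Spec_filter_pronunciation (pron : List String) (out : Bool) : Prop := out = filter_pronunciation_alt pron
instance (pron : List String) (out : Bool) : Decidable (Spec_filter_pronunciation pron out) := by unfold Spec_filter_pronunciation; infer_instance

-- ===== CLAIM (what is proved, stated in full; the proofs are below) =====
def Claim_equal_filter_pronunciation : Prop := ∀ (pron : List String), Dom_filter_pronunciation pron → Spec_filter_pronunciation pron (filter_pronunciation pron)

-- ===== LEMMAS AND PROOFS =====

-- A's vowel loop is an `any` over the list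
theorem pvAVowelLoop_eq (pron : List String) :
    pvAVowelLoop pron = pron.any (fun p => PySem.Set.contains pvVowels (pvRstrip012 p)) := by
  induction pron with
  | nil => rfl
  | cons p rest ih => simp [pvAVowelLoop, ih]

-- A's validity loop: all-valid gate, then the vowel loop on the full list
theorem pvAValidLoop_eq (full rest : List String) :
    pvAValidLoop full rest =
      ((rest.all (fun p => PySem.Set.contains pvValidPhonemes (pvRstrip012 p))) &&
       pvAVowelLoop full) := by
  induction rest with
  | nil => simp [pvAValidLoop]
  | cons p rs ih => simp [pvAValidLoop, ih, Bool.and_assoc]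

theorem filter_pronunciation_eq (pron : List String) :
    filter_pronunciation pron =
      ((pron.all (fun p => PySem.Set.contains pvValidPhonemes (pvRstrip012 p))) &&
       (pron.any (fun p => PySem.Set.contains pvVowels (pvRstrip012 p)))) := by
  rw [filter_pronunciation, pvAValidLoop_eq, pvAVowelLoop_eq]

-- the literal items of B's dict (ofList over 39 distinct keys just appends)
theorem pvKind_mk : pvKind = PySem.Dict.mk
  [("AA", true), ("AE", true), ("AH", true), ("AO", true), ("AW", true), ("AY", true),
   ("EH", true), ("ER", true), ("EY", true), ("IH", true), ("IY", true), ("OW", true),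
   ("OY", true), ("UH", true), ("UW", true),
   ("B", false), ("CH", false), ("D", false), ("DH", false), ("F", false), ("G", false),
   ("HH", false), ("JH", false), ("K", false), ("L", false), ("M", false), ("N", false),
   ("NG", false), ("P", false), ("R", false), ("S", false), ("SH", false), ("T", false),
   ("TH", false), ("V", false), ("W", false), ("Y", false), ("Z", false), ("ZH", false)] := by
  set_option maxRecDepth 10000 in decide

-- a _KIND lookup is exactly A's pair of membership tests
theorem pvKind_lookup (s : String) :
    PySem.Dict.get? pvKind s =
      if PySem.Set.contains pvValidPhonemes s then some (PySem.Set.contains pvVowels s)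
      else none := by
  by_cases h : s ∈ ["AA", "AE", "AH", "AO", "AW", "AY", "B", "CH", "D", "DH", "EH", "ER",
      "EY", "F", "G", "HH", "IH", "IY", "JH", "K", "L", "M", "N", "NG", "OW",
      "OY", "P", "R", "S", "SH", "T", "TH", "UH", "UW", "V", "W", "Y", "Z", "ZH"]
  · simp only [List.mem_cons, List.not_mem_nil, or_false] at h
    rcases h with rfl|rfl|rfl|rfl|rfl|rfl|rfl|rfl|rfl|rfl|rfl|rfl|rfl|rfl|rfl|rfl|rfl|rfl|rfl|
      rfl|rfl|rfl|rfl|rfl|rfl|rfl|rfl|rfl|rfl|rfl|rfl|rfl|rfl|rfl|rfl|rfl|rfl|rfl|rfl <;>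
      · set_option maxRecDepth 10000 in decide
  · have hvalid : PySem.Set.contains pvValidPhonemes s = false := by
      rw [Bool.eq_false_iff]
      intro hc
      exact h (by simpa [pvValidPhonemes] using (PySem.Set.contains_iff _ _).1 hc)
    have hkey : PySem.Dict.get? pvKind s = none := by
      rw [PySem.Dict.get?_eq_none_iff_not_mem_keys]
      intro hk
      rw [pvKind_mk] at hk
      simp only [PySem.Dict.keys_mk, List.mem_map, List.mem_cons, List.not_mem_nil] at hk
      obtain ⟨p, hp, rfl⟩ := hk
      rcases hp with rfl|rfl|rfl|rfl|rfl|rfl|rfl|rfl|rfl|rfl|rfl|rfl|rfl|rfl|rfl|rfl|rfl|rfl|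
        rfl|rfl|rfl|rfl|rfl|rfl|rfl|rfl|rfl|rfl|rfl|rfl|rfl|rfl|rfl|rfl|rfl|rfl|rfl|rfl|rfl|hp
      all_goals first
        | exact h (by decide)
        | exact absurd hp (by simp)
    rw [hkey]
    simp only [hvalid, Bool.false_eq_true, if_false]

-- unfolding equations for pvBLoop (rfl, proved once at high depth: the match
-- scrutinee contains the 39-entry dict literal)
theorem pvBLoop_nil (hv : Bool) : pvBLoop [] hv = hv := rfl

set_option maxRecDepth 100000 in
theorem pvBLoop_cons (p : String) (rest : List String) (hv : Bool) :
    pvBLoop (p :: rest) hv =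
      match PySem.Dict.get? pvKind (pvRstrip012 p) with
      | none => false
      | some kind => pvBLoop rest (hv || kind) := rfl

-- B's loop computes the all-valid gate and folds the vowel flag
theorem pvBLoop_eq (pron : List String) (hv : Bool) :
    pvBLoop pron hv =
      ((pron.all (fun p => PySem.Set.contains pvValidPhonemes (pvRstrip012 p))) &&
       (hv || pron.any (fun p => PySem.Set.contains pvVowels (pvRstrip012 p)))) := by
  induction pron generalizing hv with
  | nil => simp [pvBLoop_nil]
  | cons p rest ih =>
      rw [pvBLoop_cons, pvKind_lookup]
      by_cases hp : PySem.Set.contains pvValidPhonemes (pvRstrip012 p)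
      · rw [if_pos hp]
        show pvBLoop rest (hv || PySem.Set.contains pvVowels (pvRstrip012 p)) = _
        rw [ih]
        simp only [List.all_cons, List.any_cons, hp, Bool.true_and]
        cases hq : PySem.Set.contains pvVowels (pvRstrip012 p) <;> cases hv <;> simp
      · rw [if_neg hp]
        show false = _
        simp only [List.all_cons, Bool.eq_false_iff.mpr hp, Bool.false_and]

-- ===== VERDICT (by name: the statement is the Claim_ definition above) =====
set_option maxRecDepth 100000 in
theorem filter_pronunciation_spec : Claim_equal_filter_pronunciation := by
  intro pron _
  unfold Spec_filter_pronunciation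
  rw [filter_pronunciation_eq, filter_pronunciation_alt, pvBLoop_eq]
  simp
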